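-- pv_equiv track=rewrite | github.com/CodingVillainKor/raenimgl | raenimgl/text.py | _build_spans
-- ===== SOURCE A (Python) =====
-- def _build_spans(s: str) -> list[tuple[int, int]]:
--     spans: list[tuple[int, int]] = []
--     glyph_idx = 0
--
--     for word in s.split():
--         start = glyph_idx
--         glyph_idx += len(word)
--         spans.append((start, glyph_idx))
--
--     return spans
-- ===== SOURCE B (Python) =====
-- def _build_spans(s: str) -> list[tuple[int, int]]:
--     lens = [len(w) for w in s.split()]
--     ends = [sum(lens[:i + 1]) for i in range(len(lens))]
--     starts = [0] + ends[:-1]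
--     return list(zip(starts, ends))
-- ===== Notes on version B (the rewrite author's own statement) =====
-- stated objective: alternative
-- what changed: B replaces A's single loop with a running glyph counter by a three-phase table construction: a word-length list, a prefix-sum table of end offsets built by slicing, a starts list derived from it, paired with zip.
import Mathlib
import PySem

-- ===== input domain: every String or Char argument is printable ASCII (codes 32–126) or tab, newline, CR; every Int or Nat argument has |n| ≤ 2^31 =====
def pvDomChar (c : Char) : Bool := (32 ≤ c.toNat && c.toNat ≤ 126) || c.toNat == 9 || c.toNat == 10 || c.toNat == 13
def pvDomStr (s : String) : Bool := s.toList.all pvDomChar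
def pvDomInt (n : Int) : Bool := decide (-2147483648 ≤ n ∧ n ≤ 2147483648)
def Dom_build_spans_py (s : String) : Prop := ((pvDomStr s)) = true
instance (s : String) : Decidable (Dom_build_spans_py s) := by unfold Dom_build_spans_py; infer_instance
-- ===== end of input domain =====

-- B builds the span table in three phases (length list, prefix-sum end table, zip) instead of A's
-- single loop with a running glyph counter; objective: alternative decomposition, not speed.

-- ===== PORT A =====
def build_spans_py (s : String) : List (Int × Int) :=
  ((PySem.Str.split₀ s).foldl
    (fun (st : List (Int × Int) × Int) w =>
      (st.1 ++ [(st.2, st.2 + PySem.Str.len w)], st.2 + PySem.Str.len w))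
    ([], 0)).1

-- ===== PORT B =====
def build_spans_py_alt (s : String) : List (Int × Int) :=
  let lens := (PySem.Str.split₀ s).map PySem.Str.len
  let ends := (List.range lens.length).map
    (fun (i : Nat) => (PySem.List.slice lens none (some ((i : Int) + 1))).sum)
  let starts := 0 :: PySem.List.slice ends none (some (-1))
  starts.zip ends

-- ===== PRECONDITION & SPEC =====
def Spec_build_spans_py (s : String) (out : List (Int × Int)) : Prop := out = build_spans_py_alt s
instance (s : String) (out : List (Int × Int)) : Decidable (Spec_build_spans_py s out) := by unfold Spec_build_spans_py; infer_instance

-- ===== CLAIM (what is proved, stated in full; the proofs are below) =====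
def Claim_equal_build_spans_py : Prop := ∀ (s : String), Dom_build_spans_py s → Spec_build_spans_py s (build_spans_py s)

-- ===== LEMMAS AND PROOFS =====

/-- Reference recursion: spans of the word list starting at glyph index `g`. -/
def goSpans : List Int → Int → List (Int × Int)
  | [], _ => []
  | l :: ls, g => (g, g + l) :: goSpans ls (g + l)

theorem foldA_eq (ws : List String) (spans : List (Int × Int)) (g : Int) :
    (ws.foldl (fun (st : List (Int × Int) × Int) w =>
        (st.1 ++ [(st.2, st.2 + PySem.Str.len w)], st.2 + PySem.Str.len w))
      (spans, g)).1 = spans ++ goSpans (ws.map PySem.Str.len) g := by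
  induction ws generalizing spans g with
  | nil => simp [goSpans]
  | cons w ws ih =>
    simp only [List.foldl_cons, List.map_cons, goSpans]
    rw [ih]
    simp

theorem zipB_eq (ls : List Int) (g : Int) :
    (g :: (((List.range ls.length).map (fun i => g + (ls.take (i+1)).sum)).dropLast)).zip
      ((List.range ls.length).map (fun i => g + (ls.take (i+1)).sum)) = goSpans ls g := by
  induction ls generalizing g with
  | nil => simp [goSpans]
  | cons l ls ih =>
    have hmap : (List.range (l :: ls).length).map (fun i => g + ((l :: ls).take (i+1)).sum)
        = (g + l) :: (List.range ls.length).map (fun i => (g + l) + (ls.take (i+1)).sum) := by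
      simp [List.range_succ_eq_map, List.map_map, Function.comp]
      intro i _; ring
    rw [hmap]
    rcases h : (List.range ls.length).map (fun i => (g + l) + (ls.take (i+1)).sum) with _ | ⟨e, es⟩
    · have hlen : ls.length = 0 := by
        have := congrArg List.length h
        simpa using this
      have hls : ls = [] := List.eq_nil_of_length_eq_zero hlen
      subst hls
      simp [goSpans]
    · have := ih (g + l)
      rw [h] at this
      simp only [List.dropLast_cons₂, List.zip_cons_cons] at this ⊢
      rw [goSpans, ← this]

-- ===== VERDICT (by name: the statement is the Claim_ definition above) =====
theorem build_spans_py_spec : Claim_equal_build_spans_py := by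
  intro s _
  unfold Spec_build_spans_py build_spans_py build_spans_py_alt
  simp only [PySem.List.slice_to_neg_one]
  have h1 : ∀ (i : Nat), PySem.List.slice ((PySem.Str.split₀ s).map PySem.Str.len) none
      (some ((i : Int) + 1)) = ((PySem.Str.split₀ s).map PySem.Str.len).take (i + 1) := by
    intro i
    have : ((i : Int) + 1) = ((i + 1 : Nat) : Int) := by push_cast; ring
    rw [this, PySem.List.slice_to_natCast]
  simp only [h1]
  rw [foldA_eq]
  have := zipB_eq ((PySem.Str.split₀ s).map PySem.Str.len) 0
  simp only [zero_add] at this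
  exact this.symm
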